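-- pv_equiv track=rewrite | github.com/NEUNLP-RE/Erich_Relation_Classification | scripts/parser_excel.py | nearest_entity
-- ===== SOURCE A (Python) =====
-- def nearest_entity(es1_l, es2_l):
--     dis = 10000
--     d1, d2 = None, None
--     for e1 in es1_l:
--         for e2 in es2_l:
--             if abs(sum(e1) - sum(e2)) < dis:
--                 d1, d2 = e1, e2
--                 dis = abs(sum(e1) - sum(e2))
--     assert d1 and d2
--     return d1, d2
-- ===== SOURCE B (Python) =====
-- def nearest_entity(es1_l, es2_l):
--     # Precompute sums; sort + two-pointer sweep finds the minimal |sum difference|;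
--     # a first-occurrence index for each sum of es2_l then recovers A's row-major
--     # first minimal pair without scanning all pairs.
--     s1 = [sum(e) for e in es1_l]
--     s2 = [sum(e) for e in es2_l]
--     a = sorted(s1)
--     b = sorted(s2)
--     dmin = abs(a[0] - b[0])
--     i = j = 0
--     while i < len(a) and j < len(b):
--         d = abs(a[i] - b[j])
--         if d < dmin:
--             dmin = d
--         if a[i] <= b[j]:
--             i += 1
--         else:
--             j += 1
--     first2 = {}
--     for j, v in enumerate(s2):
--         first2.setdefault(v, j)
--     for i, v in enumerate(s1):
--         j1 = first2.get(v - dmin)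
--         j2 = first2.get(v + dmin)
--         if j1 is not None and (j2 is None or j1 <= j2):
--             return es1_l[i], es2_l[j1]
--         if j2 is not None:
--             return es1_l[i], es2_l[j2]
-- ===== Notes on version B (the rewrite author's own statement) =====
-- stated objective: faster
-- what changed: A's O(n*m) nested scan with a running best is replaced by: precompute both sum lists, sort them and run a two-pointer sweep to get the minimal |sum difference|, then use a first-occurrence dict over es2_l's sums to recover A's row-major-first minimal pair directly.
import Mathlib
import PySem

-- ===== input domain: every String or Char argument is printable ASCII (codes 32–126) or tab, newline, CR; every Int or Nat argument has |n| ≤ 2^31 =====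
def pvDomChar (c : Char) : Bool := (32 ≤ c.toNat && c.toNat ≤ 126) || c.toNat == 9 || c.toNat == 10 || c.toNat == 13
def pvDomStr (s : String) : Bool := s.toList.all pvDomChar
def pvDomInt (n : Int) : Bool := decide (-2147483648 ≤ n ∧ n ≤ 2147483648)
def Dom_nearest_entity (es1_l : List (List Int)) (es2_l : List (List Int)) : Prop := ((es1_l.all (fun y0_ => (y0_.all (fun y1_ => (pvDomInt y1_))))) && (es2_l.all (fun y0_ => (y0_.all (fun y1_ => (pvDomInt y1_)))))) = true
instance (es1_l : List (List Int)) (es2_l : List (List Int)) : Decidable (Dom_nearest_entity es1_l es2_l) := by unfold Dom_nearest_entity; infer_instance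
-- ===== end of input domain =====

-- B replaces A's O(n*m) nested scan by: precompute the sum lists, sort + two-pointer sweep
-- for the minimal |sum difference|, then a first-occurrence dict over es2_l's sums to recover
-- A's row-major-first minimal pair. Equivalence is about the return value; nothing is mutated.

-- ===== PORT A =====
def nearest_entity (es1_l : List (List Int)) (es2_l : List (List Int)) : List Int × List Int :=
  -- dis = 10000; d1, d2 = None, None; nested for-loops; strict-< update
  let st := es1_l.foldl (fun st e1 =>
    es2_l.foldl (fun st e2 =>
      if ((e1.sum - e2.sum).natAbs : Int) < st.1 then
        (((e1.sum - e2.sum).natAbs : Int), some e1, some e2)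
      else st) st)
    ((10000 : Int), (none : Option (List Int)), (none : Option (List Int)))
  -- assert d1 and d2 (falsy = None or empty list); on failure Python raises: totalized to ([], []), excluded by Pre_
  match st.2.1, st.2.2 with
  | some d1, some d2 => if d1 ≠ [] ∧ d2 ≠ [] then (d1, d2) else ([], [])
  | _, _ => ([], [])

-- ===== PORT B =====
-- the while-loop: two pointers over the two sorted sum lists, running minimum dmin
def pvTP : List Int → List Int → Int → Int
  | x :: xs, y :: ys, dmin =>
      let d : Int := ((x - y).natAbs : Int)
      let dmin' := if d < dmin then d else dmin
      if x ≤ y then pvTP xs (y :: ys) dmin' else pvTP (x :: xs) ys dmin'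
  | _, _, dmin => dmin
termination_by a b _ => a.length + b.length

-- first2: for j, v in enumerate(s2): first2.setdefault(v, j)
def pvFirst2 (s2 : List Int) : PySem.Dict Int Int :=
  (PySem.List.enumerate s2 0).foldl (fun d p => d.setdefault p.2 p.1) PySem.Dict.empty

-- the final for-loop with its early returns (Python falls off the end returning None only
-- when no index matches; that cannot happen when dmin is realised by a pair — totalized to ([], []))
def pvScan (es1_l es2_l : List (List Int)) (first2 : PySem.Dict Int Int) (dmin : Int) :
    List (Int × Int) → List Int × List Int
  | [] => ([], [])
  | (i, v) :: rest =>
    match first2.get? (v - dmin), first2.get? (v + dmin) with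
    | some j1, none =>
        ((PySem.List.pyGet? es1_l i).getD [], (PySem.List.pyGet? es2_l j1).getD [])
    | some j1, some j2 =>
        if j1 ≤ j2 then ((PySem.List.pyGet? es1_l i).getD [], (PySem.List.pyGet? es2_l j1).getD [])
        else ((PySem.List.pyGet? es1_l i).getD [], (PySem.List.pyGet? es2_l j2).getD [])
    | none, some j2 =>
        ((PySem.List.pyGet? es1_l i).getD [], (PySem.List.pyGet? es2_l j2).getD [])
    | none, none => pvScan es1_l es2_l first2 dmin rest

def nearest_entity_alt (es1_l : List (List Int)) (es2_l : List (List Int)) : List Int × List Int :=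
  let s1 := es1_l.map List.sum
  let s2 := es2_l.map List.sum
  let a := PySem.List.sorted s1 (fun x => x) false
  let b := PySem.List.sorted s2 (fun x => x) false
  match a, b with
  | x :: _, y :: _ =>
      let dmin := pvTP a b ((x - y).natAbs : Int)
      pvScan es1_l es2_l (pvFirst2 s2) dmin (PySem.List.enumerate s1 0)
  | _, _ => ([], [])   -- a[0] / b[0] would raise IndexError in Python; outside Pre_

-- ===== PRECONDITION & SPEC =====
def pvDist (es1_l es2_l : List (List Int)) (i j : Nat) : Nat :=
  ((es1_l.getD i []).sum - (es2_l.getD j []).sum).natAbs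

-- Pre_: exactly the inputs where A's assert passes, i.e. there is a pair at sum-distance < 10000 and the
-- iteration-order-first closest pair consists of two nonempty lists (Python's `assert d1 and d2`).
def Pre_nearest_entity (es1_l : List (List Int)) (es2_l : List (List Int)) : Prop :=
  ∃ i ∈ List.range es1_l.length, ∃ j ∈ List.range es2_l.length,
    pvDist es1_l es2_l i j < 10000 ∧ es1_l.getD i [] ≠ [] ∧ es2_l.getD j [] ≠ [] ∧
    (∀ i' ∈ List.range es1_l.length, ∀ j' ∈ List.range es2_l.length,
      pvDist es1_l es2_l i j ≤ pvDist es1_l es2_l i' j' ∧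
      (pvDist es1_l es2_l i' j' = pvDist es1_l es2_l i j → (i < i' ∨ (i = i' ∧ j ≤ j'))))

instance (es1_l : List (List Int)) (es2_l : List (List Int)) : Decidable (Pre_nearest_entity es1_l es2_l) := by
  unfold Pre_nearest_entity; infer_instance

def pvWitness_nearest_entity : List (List Int) × List (List Int) := ([[1, 2], [5]], [[4], [100]])

def Spec_nearest_entity (es1_l : List (List Int)) (es2_l : List (List Int)) (out : List Int × List Int) : Prop := out = nearest_entity_alt es1_l es2_l
instance (es1_l : List (List Int)) (es2_l : List (List Int)) (out : List Int × List Int) : Decidable (Spec_nearest_entity es1_l es2_l out) := by unfold Spec_nearest_entity; infer_instance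

-- ===== CLAIM (what is proved, stated in full; the proofs are below) =====
def Claim_equal_nearest_entity : Prop := ∀ (es1_l : List (List Int)) (es2_l : List (List Int)), Dom_nearest_entity es1_l es2_l → Pre_nearest_entity es1_l es2_l → Spec_nearest_entity es1_l es2_l (nearest_entity es1_l es2_l)

-- ===== LEMMAS AND PROOFS =====

------------------------------------------------------------------------------
-- Part A: A's nested fold returns the row-major-first minimal pair.
------------------------------------------------------------------------------

-- comparison of (distance, i, j) triples, Python-tuple style, used only in the proof
def pvLexLt (x y : Int × Int × Int) : Bool :=
  x.1 < y.1 || (x.1 == y.1 && (x.2.1 < y.2.1 || (x.2.1 == y.2.1 && x.2.2 < y.2.2)))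

def pvMinStep (acc : Option (Int × Int × Int)) (c : Int × Int × Int) : Option (Int × Int × Int) :=
  match acc with
  | none => some c
  | some a => if pvLexLt c a then some c else some a

def pvCand (es1_l es2_l : List (List Int)) : List ((Int × List Int) × (Int × List Int)) :=
  (PySem.List.enumerate es1_l 0).flatMap (fun p => (PySem.List.enumerate es2_l 0).map (fun q => (p, q)))

def pvStepA (st : Int × Option (List Int) × Option (List Int))
    (c : (Int × List Int) × (Int × List Int)) : Int × Option (List Int) × Option (List Int) :=
  if ((c.1.2.sum - c.2.2.sum).natAbs : Int) < st.1 then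
    (((c.1.2.sum - c.2.2.sum).natAbs : Int), some c.1.2, some c.2.2)
  else st

def pvTrip (c : (Int × List Int) × (Int × List Int)) : Int × Int × Int :=
  (((c.1.2.sum - c.2.2.sum).natAbs : Int), c.1.1, c.2.1)

def pvInv (es1_l es2_l : List (List Int))
    (st : Int × Option (List Int) × Option (List Int)) (o : Option (Int × Int × Int)) : Prop :=
  (o = none ∧ st = (10000, none, none)) ∨
  (∃ d i j a b, o = some (d, i, j) ∧ PySem.List.pyGet? es1_l i = some a ∧
    PySem.List.pyGet? es2_l j = some b ∧ d = ((a.sum - b.sum).natAbs : Int) ∧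
    ((d < 10000 ∧ st = (d, some a, some b)) ∨ (10000 ≤ d ∧ st = (10000, none, none))))

def pvIdxLt (p q : Int × Int) : Prop := p.1 < q.1 ∨ (p.1 = q.1 ∧ p.2 < q.2)

theorem pvLexLt_iff (x y : Int × Int × Int) : pvLexLt x y = true ↔
    (x.1 < y.1 ∨ (x.1 = y.1 ∧ (x.2.1 < y.2.1 ∨ (x.2.1 = y.2.1 ∧ x.2.2 < y.2.2)))) := by
  simp [pvLexLt]

theorem pv_min_spec (cs : List (Int × Int × Int)) (a : Int × Int × Int) :
    ∃ t, cs.foldl pvMinStep (some a) = some t ∧ (t = a ∨ t ∈ cs) ∧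
      ¬ pvLexLt a t ∧ ∀ x ∈ cs, ¬ pvLexLt x t := by
  induction cs generalizing a with
  | nil => exact ⟨a, rfl, Or.inl rfl, by simp [pvLexLt_iff], by simp⟩
  | cons c rest ih =>
    by_cases h : pvLexLt c a = true
    · obtain ⟨t, ht, hmem, hle, hall⟩ := ih c
      refine ⟨t, by simp [List.foldl_cons, pvMinStep, h, ht], ?_, ?_, ?_⟩
      · rcases hmem with h1 | h1
        · exact Or.inr (h1 ▸ List.mem_cons_self)
        · exact Or.inr (List.mem_cons_of_mem _ h1)
      · intro hat
        have h1 := (pvLexLt_iff _ _).1 h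
        have h2 := (pvLexLt_iff _ _).1 hat
        exact hle ((pvLexLt_iff _ _).2 (by omega))
      · intro x hx
        rcases List.mem_cons.1 hx with rfl | hx
        · exact hle
        · exact hall x hx
    · obtain ⟨t, ht, hmem, hle, hall⟩ := ih a
      refine ⟨t, by simp [List.foldl_cons, pvMinStep, h, ht], ?_, hle, ?_⟩
      · rcases hmem with h1 | h1
        · exact Or.inl h1
        · exact Or.inr (List.mem_cons_of_mem _ h1)
      · intro x hx
        rcases List.mem_cons.1 hx with rfl | hx
        · intro hct
          have h1 : ¬ (pvLexLt x a = true) := h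
          rw [pvLexLt_iff] at h1
          have h2 := (pvLexLt_iff _ _).1 hct
          have h3 : ¬ (pvLexLt a t = true) := hle
          rw [pvLexLt_iff] at h3
          omega
        · exact hall x hx

theorem pv_min_spec_none (cs : List (Int × Int × Int)) (hne : cs ≠ []) :
    ∃ t, cs.foldl pvMinStep none = some t ∧ t ∈ cs ∧ ∀ x ∈ cs, ¬ pvLexLt x t := by
  match cs, hne with
  | c :: rest, _ =>
    obtain ⟨t, ht, hmem, hle, hall⟩ := pv_min_spec rest c
    refine ⟨t, ht, ?_, ?_⟩
    · rcases hmem with h1 | h1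
      · exact h1 ▸ List.mem_cons_self
      · exact List.mem_cons_of_mem _ h1
    · intro x hx
      rcases List.mem_cons.1 hx with rfl | hx
      · exact hle
      · exact hall x hx

theorem pv_main (es1_l es2_l : List (List Int)) :
    ∀ (cs : List ((Int × List Int) × (Int × List Int)))
      (st : Int × Option (List Int) × Option (List Int)) (o : Option (Int × Int × Int)),
      pvInv es1_l es2_l st o →
      (∀ c ∈ cs, PySem.List.pyGet? es1_l c.1.1 = some c.1.2 ∧ PySem.List.pyGet? es2_l c.2.1 = some c.2.2) →
      cs.Pairwise (fun a b => pvIdxLt (a.1.1, a.2.1) (b.1.1, b.2.1)) →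
      (∀ c ∈ cs, ∀ d i j, o = some (d, i, j) → pvIdxLt (i, j) (c.1.1, c.2.1)) →
      pvInv es1_l es2_l (cs.foldl pvStepA st) (cs.foldl (fun o c => pvMinStep o (pvTrip c)) o) := by
  intro cs
  induction cs with
  | nil => intro st o hinv _ _ _; exact hinv
  | cons c rest ih =>
    intro st o hinv hc hpw hord
    simp only [List.foldl_cons]
    have hcand := hc c List.mem_cons_self
    have hpw' := (List.pairwise_cons.1 hpw).2
    have hpwhead := (List.pairwise_cons.1 hpw).1
    set dc : Int := ((c.1.2.sum - c.2.2.sum).natAbs : Int) with hdc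
    apply ih
    · rcases hinv with ⟨ho, hst⟩ | ⟨d, i, j, a, b, ho, hga, hgb, hd, hbr⟩
      · subst ho; subst hst
        simp only [pvMinStep, pvStepA, pvTrip]
        by_cases hlt : dc < 10000
        · rw [if_pos (by omega)]
          exact Or.inr ⟨dc, c.1.1, c.2.1, c.1.2, c.2.2, rfl, hcand.1, hcand.2, rfl, Or.inl ⟨hlt, rfl⟩⟩
        · rw [if_neg (by omega)]
          exact Or.inr ⟨dc, c.1.1, c.2.1, c.1.2, c.2.2, rfl, hcand.1, hcand.2, rfl, Or.inr ⟨by omega, rfl⟩⟩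
      · subst ho
        have hidx : pvIdxLt (i, j) (c.1.1, c.2.1) := hord c List.mem_cons_self d i j rfl
        simp only [pvMinStep, pvTrip]
        rcases hbr with ⟨hdlt, hst⟩ | ⟨hdge, hst⟩
        · subst hst
          by_cases hlt : pvLexLt (dc, c.1.1, c.2.1) (d, i, j) = true
          · have h1 := (pvLexLt_iff _ _).1 hlt
            simp only at h1
            have hdcd : dc < d := by
              rcases hidx with h2 | ⟨h2, h3⟩ <;> omega
            rw [if_pos hlt]
            simp only [pvStepA]
            rw [if_pos (by simpa [hdc] using hdcd)]
            exact Or.inr ⟨dc, c.1.1, c.2.1, c.1.2, c.2.2, rfl, hcand.1, hcand.2, rfl,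
              Or.inl ⟨by omega, rfl⟩⟩
          · have h1 : ¬ (pvLexLt (dc, c.1.1, c.2.1) (d, i, j) = true) := hlt
            rw [pvLexLt_iff] at h1
            simp only at h1
            have hdcd : d ≤ dc := by omega
            rw [if_neg hlt]
            simp only [pvStepA]
            rw [if_neg (by simp only [← hdc]; omega)]
            exact Or.inr ⟨d, i, j, a, b, rfl, hga, hgb, hd, Or.inl ⟨hdlt, rfl⟩⟩
        · subst hst
          by_cases hlt : pvLexLt (dc, c.1.1, c.2.1) (d, i, j) = true
          · rw [if_pos hlt]
            simp only [pvStepA]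
            by_cases h2 : dc < 10000
            · rw [if_pos (by simpa [hdc] using h2)]
              exact Or.inr ⟨dc, c.1.1, c.2.1, c.1.2, c.2.2, rfl, hcand.1, hcand.2, rfl,
                Or.inl ⟨h2, rfl⟩⟩
            · rw [if_neg (by simp only [← hdc]; omega)]
              exact Or.inr ⟨dc, c.1.1, c.2.1, c.1.2, c.2.2, rfl, hcand.1, hcand.2, rfl,
                Or.inr ⟨by omega, rfl⟩⟩
          · have h1 : ¬ (pvLexLt (dc, c.1.1, c.2.1) (d, i, j) = true) := hlt
            rw [pvLexLt_iff] at h1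
            simp only at h1
            have : 10000 ≤ dc := by omega
            rw [if_neg hlt]
            simp only [pvStepA]
            rw [if_neg (by simp only [← hdc]; omega)]
            exact Or.inr ⟨d, i, j, a, b, rfl, hga, hgb, hd, Or.inr ⟨hdge, rfl⟩⟩
    · intro c' hc'; exact hc c' (List.mem_cons_of_mem _ hc')
    · exact hpw'
    · intro c' hc' d i j hnew
      have hcidx : pvIdxLt (c.1.1, c.2.1) (c'.1.1, c'.2.1) := hpwhead c' hc'
      rcases ho : o with _ | t
      · subst ho
        simp only [pvMinStep, pvTrip] at hnew
        injection hnew with h1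
        simp only [Prod.mk.injEq] at h1
        obtain ⟨-, h2, h3⟩ := h1
        subst h2; subst h3
        exact hcidx
      · subst ho
        simp only [pvMinStep, pvTrip] at hnew
        split at hnew <;> injection hnew with h1
        · simp only [Prod.mk.injEq] at h1
          obtain ⟨-, h2, h3⟩ := h1
          subst h2; subst h3
          exact hcidx
        · exact hord c' (List.mem_cons_of_mem _ hc') d i j (by rw [h1])

theorem pv_A_fold_inner (es2_l : List (List Int)) (p : Int × List Int) :
    ∀ (s2 : Int) (st : Int × Option (List Int) × Option (List Int)),
    ((PySem.List.enumerate es2_l s2).map (fun q => (p, q))).foldl pvStepA st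
      = es2_l.foldl (fun st e2 =>
          if ((p.2.sum - e2.sum).natAbs : Int) < st.1 then
            (((p.2.sum - e2.sum).natAbs : Int), some p.2, some e2)
          else st) st := by
  induction es2_l with
  | nil => intro _ _; rfl
  | cons e es ih =>
    intro s2 st
    simp only [PySem.List.enumerate_cons, List.map_cons, List.foldl_cons]
    rw [ih]
    rfl

theorem pv_A_fold (es1_l es2_l : List (List Int)) :
    ∀ (s1 : Int) (st : Int × Option (List Int) × Option (List Int)),
    ((PySem.List.enumerate es1_l s1).flatMap (fun p =>
        (PySem.List.enumerate es2_l 0).map (fun q => (p, q)))).foldl pvStepA st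
      = es1_l.foldl (fun st e1 =>
          es2_l.foldl (fun st e2 =>
            if ((e1.sum - e2.sum).natAbs : Int) < st.1 then
              (((e1.sum - e2.sum).natAbs : Int), some e1, some e2)
            else st) st) st := by
  induction es1_l with
  | nil => intro _ _; rfl
  | cons e es ih =>
    intro s1 st
    simp only [PySem.List.enumerate_cons, List.flatMap_cons, List.foldl_append]
    rw [pv_A_fold_inner, ih, List.foldl_cons]

theorem pv_cand_get (es1_l es2_l : List (List Int)) :
    ∀ c ∈ pvCand es1_l es2_l,
      PySem.List.pyGet? es1_l c.1.1 = some c.1.2 ∧ PySem.List.pyGet? es2_l c.2.1 = some c.2.2 := by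
  intro c hc
  simp only [pvCand, List.mem_flatMap, List.mem_map, PySem.List.mem_enumerate_iff] at hc
  obtain ⟨p, ⟨k, hk, rfl⟩, q, ⟨l, hl, rfl⟩, rfl⟩ := hc
  constructor <;> simp [PySem.List.pyGet?_natCast]

theorem pv_cand_pairwise (es1_l es2_l : List (List Int)) :
    (pvCand es1_l es2_l).Pairwise (fun a b => pvIdxLt (a.1.1, a.2.1) (b.1.1, b.2.1)) := by
  rw [pvCand, List.pairwise_flatMap]
  constructor
  · intro p hp
    rw [List.pairwise_map]
    exact (PySem.List.pairwise_lt_enumerate _ _).imp (fun h => Or.inr ⟨rfl, h⟩)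
  · refine (PySem.List.pairwise_lt_enumerate _ _).imp ?_
    intro p p' h x hx y hy
    simp only [List.mem_map] at hx hy
    obtain ⟨q, -, rfl⟩ := hx
    obtain ⟨q', -, rfl⟩ := hy
    exact Or.inl h

theorem pv_cand_exists (es1_l es2_l : List (List Int)) (k l : Nat)
    (hk : k < es1_l.length) (hl : l < es2_l.length) :
    (((k : Int), es1_l[k]), ((l : Int), es2_l[l])) ∈ pvCand es1_l es2_l := by
  simp only [pvCand, List.mem_flatMap, List.mem_map, PySem.List.mem_enumerate_iff]
  exact ⟨((k : Int), es1_l[k]), ⟨k, hk, by simp⟩, ⟨((l : Int), es2_l[l]), ⟨l, hl, by simp⟩, rfl⟩⟩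

theorem pv_dist_eq (es1_l es2_l : List (List Int)) (k l : Nat)
    (hk : k < es1_l.length) (hl : l < es2_l.length) :
    ((es1_l[k].sum - es2_l[l].sum).natAbs) = pvDist es1_l es2_l k l := by
  simp [pvDist, hk, hl]

-- A returns the witness pair of Pre_.
theorem pv_A_eq (es1_l es2_l : List (List Int)) (iw jw : Nat)
    (hiw : iw < es1_l.length) (hjw : jw < es2_l.length)
    (hne1 : es1_l.getD iw [] ≠ []) (hne2 : es2_l.getD jw [] ≠ [])
    (hdw : pvDist es1_l es2_l iw jw < 10000)
    (hmin : ∀ i' ∈ List.range es1_l.length, ∀ j' ∈ List.range es2_l.length,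
      pvDist es1_l es2_l iw jw ≤ pvDist es1_l es2_l i' j' ∧
      (pvDist es1_l es2_l i' j' = pvDist es1_l es2_l iw jw → (iw < i' ∨ (iw = i' ∧ jw ≤ j')))) :
    nearest_entity es1_l es2_l = (es1_l[iw], es2_l[jw]) := by
  have hg1 : es1_l.getD iw [] = es1_l[iw] := List.getD_eq_getElem _ _ hiw
  have hg2 : es2_l.getD jw [] = es2_l[jw] := List.getD_eq_getElem _ _ hjw
  have hcw : (((iw : Int), es1_l[iw]), ((jw : Int), es2_l[jw])) ∈ pvCand es1_l es2_l :=
    pv_cand_exists _ _ iw jw hiw hjw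
  have htsne : (pvCand es1_l es2_l).map pvTrip ≠ [] := by
    intro h
    have hmem := List.mem_map_of_mem (f := pvTrip) hcw
    rw [h] at hmem
    exact List.not_mem_nil hmem
  obtain ⟨t, hfold, htmem, htlb⟩ := pv_min_spec_none _ htsne
  obtain ⟨c, hcmem, hct⟩ := List.mem_map.1 htmem
  have hcdec := hcmem
  simp only [pvCand, List.mem_flatMap, List.mem_map, PySem.List.mem_enumerate_iff] at hcdec
  obtain ⟨p, ⟨k, hk, rfl⟩, q, ⟨l, hl, rfl⟩, rfl⟩ := hcdec
  have hlbw := htlb _ (List.mem_map_of_mem (f := pvTrip) hcw)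
  rw [pvLexLt_iff] at hlbw
  simp only [pvTrip, ← hct] at hlbw
  rw [pv_dist_eq es1_l es2_l iw jw hiw hjw, pv_dist_eq es1_l es2_l k l hk hl] at hlbw
  have hminkl := hmin k (List.mem_range.2 hk) l (List.mem_range.2 hl)
  have hkiw : k = iw ∧ l = jw := by
    rcases hminkl with ⟨hle, htie⟩
    by_cases heqd : pvDist es1_l es2_l k l = pvDist es1_l es2_l iw jw
    · have := htie heqd
      omega
    · exfalso
      apply hlbw
      left
      have : pvDist es1_l es2_l iw jw < pvDist es1_l es2_l k l := by omega
      exact_mod_cast this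
  obtain ⟨rfl, rfl⟩ := (⟨hkiw.1.symm, hkiw.2.symm⟩ : iw = k ∧ jw = l)
  have hfold' : (pvCand es1_l es2_l).foldl (fun o c => pvMinStep o (pvTrip c)) none = some t := by
    rw [← List.foldl_map]
    exact hfold
  have hinv := pv_main es1_l es2_l (pvCand es1_l es2_l)
    ((10000 : Int), (none : Option (List Int)), (none : Option (List Int))) none
    (Or.inl ⟨rfl, rfl⟩) (pv_cand_get _ _) (pv_cand_pairwise _ _)
    (by intro c hc d i j h; simp at h)
  rw [hfold'] at hinv
  show (match (es1_l.foldl (fun st e1 =>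
      es2_l.foldl (fun st e2 =>
        if ((e1.sum - e2.sum).natAbs : Int) < st.1 then
          (((e1.sum - e2.sum).natAbs : Int), some e1, some e2)
        else st) st)
      ((10000 : Int), (none : Option (List Int)), (none : Option (List Int)))).2.1,
      (es1_l.foldl (fun st e1 =>
      es2_l.foldl (fun st e2 =>
        if ((e1.sum - e2.sum).natAbs : Int) < st.1 then
          (((e1.sum - e2.sum).natAbs : Int), some e1, some e2)
        else st) st)
      ((10000 : Int), (none : Option (List Int)), (none : Option (List Int)))).2.2 with
    | some d1, some d2 => if d1 ≠ [] ∧ d2 ≠ [] then (d1, d2) else ([], [])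
    | _, _ => ([], [])) = _
  rw [← pv_A_fold es1_l es2_l 0]
  rcases hinv with ⟨h1, -⟩ | ⟨d, i, j, a, b, heq, hga, hgb, hd, hbr⟩
  · simp at h1
  · have ht' : t = (d, i, j) := Option.some.inj heq
    rw [← hct] at ht'
    simp only [pvTrip, Prod.mk.injEq] at ht'
    obtain ⟨hd1, hi1, hj1⟩ := ht'
    rw [← hi1] at hga
    rw [← hj1] at hgb
    simp only [zero_add, PySem.List.pyGet?_natCast] at hga hgb
    rw [List.getElem?_eq_getElem hiw] at hga
    rw [List.getElem?_eq_getElem hjw] at hgb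
    have ha : a = es1_l[iw] := (Option.some.inj hga).symm
    have hb : b = es2_l[jw] := (Option.some.inj hgb).symm
    rcases hbr with ⟨-, hst⟩ | ⟨hdge, -⟩
    · rw [pvCand] at hst
      rw [hst]
      have hane : a ≠ [] := by rw [ha, ← hg1]; exact hne1
      have hbne : b ≠ [] := by rw [hb, ← hg2]; exact hne2
      simp only [ne_eq]
      rw [if_pos ⟨hane, hbne⟩, ha, hb]
    · exfalso
      rw [← hd1] at hdge
      rw [pv_dist_eq es1_l es2_l iw jw hiw hjw] at hdge
      omega

------------------------------------------------------------------------------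
-- Part B: the two-pointer sweep computes the minimal pair distance, the
-- first-occurrence dict the earliest indices, the scan the witness pair.
------------------------------------------------------------------------------

theorem pv_tp_spec : ∀ (n : Nat) (a b : List Int), a.length + b.length ≤ n →
    a.Pairwise (· ≤ ·) → b.Pairwise (· ≤ ·) → ∀ d : Int,
    (pvTP a b d ≤ d ∧ (∀ x ∈ a, ∀ y ∈ b, pvTP a b d ≤ ((x - y).natAbs : Int)) ∧
     (pvTP a b d = d ∨ ∃ x ∈ a, ∃ y ∈ b, pvTP a b d = ((x - y).natAbs : Int))) := by
  intro n
  induction n with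
  | zero =>
    intro a b hlen _ _ d
    match a, b with
    | [], [] => refine ⟨?_, ?_, Or.inl ?_⟩ <;> simp [pvTP]
    | x :: xs, _ => simp at hlen
    | [], y :: ys => simp at hlen
  | succ n ih =>
    intro a b hlen hsa hsb d
    match a, b with
    | [], b => refine ⟨?_, ?_, Or.inl ?_⟩ <;> simp [pvTP]
    | x :: xs, [] => refine ⟨?_, ?_, Or.inl ?_⟩ <;> simp [pvTP]
    | x :: xs, y :: ys =>
      have hxxs := List.pairwise_cons.1 hsa
      have hyys := List.pairwise_cons.1 hsb
      have hunf : pvTP (x :: xs) (y :: ys) d =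
          if x ≤ y then pvTP xs (y :: ys) (if ((x - y).natAbs : Int) < d then ((x - y).natAbs : Int) else d)
          else pvTP (x :: xs) ys (if ((x - y).natAbs : Int) < d then ((x - y).natAbs : Int) else d) := by
        simp [pvTP]
      set d' := (if ((x - y).natAbs : Int) < d then ((x - y).natAbs : Int) else d) with hd'
      have hd'le : d' ≤ d := by rw [hd']; split <;> omega
      have hd'D : d' ≤ ((x - y).natAbs : Int) := by rw [hd']; split <;> omega
      have hd'or : d' = d ∨ d' = ((x - y).natAbs : Int) := by
        rw [hd']; split
        · exact Or.inr rfl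
        · exact Or.inl rfl
      by_cases hxy : x ≤ y
      · obtain ⟨h1, h2, h3⟩ := ih xs (y :: ys) (by simp at hlen ⊢; omega) hxxs.2 hsb d'
        rw [hunf, if_pos hxy]
        refine ⟨le_trans h1 hd'le, ?_, ?_⟩
        · intro x' hx' y' hy'
          rcases List.mem_cons.1 hx' with hx'e | hx'
          · rw [hx'e]
            have hyy' : y ≤ y' := by
              rcases List.mem_cons.1 hy' with rfl | hy'
              · exact le_refl _
              · exact hyys.1 y' hy'
            have habs : ((x - y).natAbs : Int) ≤ ((x - y').natAbs : Int) := by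
              rw [Int.natCast_natAbs, Int.natCast_natAbs,
                abs_of_nonpos (by omega), abs_of_nonpos (by omega)]
              omega
            exact le_trans (le_trans h1 hd'D) habs
          · exact h2 x' hx' y' hy'
        · rcases h3 with h3 | ⟨x', hx', y', hy', h3⟩
          · rw [h3]
            rcases hd'or with h | h
            · exact Or.inl h
            · exact Or.inr ⟨x, List.mem_cons_self, y, List.mem_cons_self, h⟩
          · exact Or.inr ⟨x', List.mem_cons_of_mem _ hx', y', hy', h3⟩
      · obtain ⟨h1, h2, h3⟩ := ih (x :: xs) ys (by simp at hlen ⊢; omega) hsa hyys.2 d'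
        rw [hunf, if_neg hxy]
        refine ⟨le_trans h1 hd'le, ?_, ?_⟩
        · intro x' hx' y' hy'
          rcases List.mem_cons.1 hy' with hy'e | hy'
          · rw [hy'e]
            have hxx' : x ≤ x' := by
              rcases List.mem_cons.1 hx' with rfl | hx'
              · exact le_refl _
              · exact hxxs.1 x' hx'
            have habs : ((x - y).natAbs : Int) ≤ ((x' - y).natAbs : Int) := by
              rw [Int.natCast_natAbs, Int.natCast_natAbs,
                abs_of_nonneg (by omega), abs_of_nonneg (by omega)]
              omega
            exact le_trans (le_trans h1 hd'D) habs
          · exact h2 x' hx' y' hy'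
        · rcases h3 with h3 | ⟨x', hx', y', hy', h3⟩
          · rw [h3]
            rcases hd'or with h | h
            · exact Or.inl h
            · exact Or.inr ⟨x, List.mem_cons_self, y, List.mem_cons_self, h⟩
          · exact Or.inr ⟨x', hx', y', List.mem_cons_of_mem _ hy', h3⟩

theorem pv_setdefault_fold (ps : List (Int × Int)) (d : PySem.Dict Int Int) (v : Int) :
    (ps.foldl (fun d p => d.setdefault p.2 p.1) d).get? v =
      (d.get? v).or ((ps.find? (fun p => p.2 == v)).map (·.1)) := by
  induction ps generalizing d with
  | nil => simp
  | cons p ps ih =>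
    simp only [List.foldl_cons, ih]
    by_cases hv : p.2 = v
    · rw [List.find?_cons_of_pos (by simp [hv]), ← hv, PySem.Dict.get?_setdefault_self d p.2 p.1]
      cases h : d.get? p.2 <;> simp
    · rw [List.find?_cons_of_neg (by simp [hv]),
        PySem.Dict.get?_setdefault_of_ne d p.1 (Ne.symm hv)]

theorem pv_find_enumerate (v : Int) : ∀ (s2 : List Int) (s : Int) (j : Nat),
    s2[j]? = some v → (∀ k, k < j → s2[k]? ≠ some v) →
    (PySem.List.enumerate s2 s).find? (fun p => p.2 == v) = some (s + (j : Int), v) := by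
  intro s2
  induction s2 with
  | nil => intro s j hj _; simp at hj
  | cons x t ih =>
    intro s j hj hleast
    rw [PySem.List.enumerate_cons]
    match j with
    | 0 =>
      simp only [List.getElem?_cons_zero, Option.some.injEq] at hj
      rw [List.find?_cons_of_pos (by simp [hj])]
      simp [hj]
    | j' + 1 =>
      have hx : x ≠ v := by
        have := hleast 0 (by omega)
        simpa using this
      rw [List.find?_cons_of_neg (by simp [hx])]
      rw [ih (s + 1) j' (by simpa using hj)
        (fun k hk => by simpa using hleast (k + 1) (by omega))]
      congr 1
      push_cast
      ring_nf

theorem pv_first2_none (s2 : List Int) (v : Int)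
    (h : ∀ k : Nat, s2[k]? ≠ some v) : (pvFirst2 s2).get? v = none := by
  rw [pvFirst2, pv_setdefault_fold]
  rw [List.find?_eq_none.2 ?_]
  · simp
  · intro p hp
    simp only [PySem.List.mem_enumerate_iff] at hp
    obtain ⟨k, hk, rfl⟩ := hp
    have := h k
    rw [List.getElem?_eq_getElem hk] at this
    simp only [ne_eq, Option.some.injEq] at this
    simp [this]

theorem pv_first2_some (s2 : List Int) (v : Int) (j : Nat)
    (hv : s2[j]? = some v) (hleast : ∀ k : Nat, s2[k]? = some v → j ≤ k) :
    (pvFirst2 s2).get? v = some (j : Int) := by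
  rw [pvFirst2, pv_setdefault_fold,
    pv_find_enumerate v s2 0 j hv (fun k hk hkv => by have := hleast k hkv; omega)]
  simp

-- a pair index k matches key s1[i] ± dm exactly when its distance to row i is dm
theorem pv_key_iff (es1_l es2_l : List (List Int)) (i k : Nat) (hi : i < es1_l.length)
    (hk : k < es2_l.length) (dm : Nat) :
    ((es2_l.map List.sum)[k]? = some (es1_l[i].sum - (dm : Int)) ∨
     (es2_l.map List.sum)[k]? = some (es1_l[i].sum + (dm : Int)))
    ↔ pvDist es1_l es2_l i k = dm := by
  rw [List.getElem?_map, List.getElem?_eq_getElem hk]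
  simp only [Option.map_some, Option.some.injEq]
  rw [pvDist, List.getD_eq_getElem _ _ hi, List.getD_eq_getElem _ _ hk]
  omega

theorem pv_some_lt (es2_l : List (List Int)) (k : Nat) (w : Int)
    (h : (es2_l.map List.sum)[k]? = some w) : k < es2_l.length := by
  have := (List.getElem?_eq_some_iff.1 h).1
  simpa using this

theorem pv_scan_head (es1_l es2_l : List (List Int)) (iw jw : Nat)
    (hiw : iw < es1_l.length) (hjw : jw < es2_l.length)
    (hmin : ∀ i' < es1_l.length, ∀ j' < es2_l.length,
      pvDist es1_l es2_l iw jw ≤ pvDist es1_l es2_l i' j' ∧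
      (pvDist es1_l es2_l i' j' = pvDist es1_l es2_l iw jw → (iw < i' ∨ (iw = i' ∧ jw ≤ j')))) :
    ∀ rest : List (Int × Int),
    pvScan es1_l es2_l (pvFirst2 (es2_l.map List.sum)) ((pvDist es1_l es2_l iw jw : Int))
      (((iw : Int), es1_l[iw].sum) :: rest) = (es1_l[iw], es2_l[jw]) := by
  intro rest
  set s2 := es2_l.map List.sum with hs2
  set v := es1_l[iw].sum with hv
  set dm := pvDist es1_l es2_l iw jw with hdm
  have hjwkey : s2[jw]? = some (v - (dm : Int)) ∨ s2[jw]? = some (v + (dm : Int)) :=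
    (pv_key_iff es1_l es2_l iw jw hiw hjw dm).2 rfl
  have hF : ∀ k : Nat, (s2[k]? = some (v - (dm : Int)) ∨ s2[k]? = some (v + (dm : Int))) → jw ≤ k := by
    intro k hk
    have hklen : k < es2_l.length := by
      rcases hk with hk | hk
      · exact pv_some_lt _ _ _ hk
      · exact pv_some_lt _ _ _ hk
    have hdk : pvDist es1_l es2_l iw k = dm := (pv_key_iff es1_l es2_l iw k hiw hklen dm).1 hk
    have := (hmin iw hiw k hklen).2 hdk
    omega
  have hret : ∀ j : Nat, j = jw →
      ((PySem.List.pyGet? es1_l ((iw : Nat) : Int)).getD [],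
        (PySem.List.pyGet? es2_l ((j : Nat) : Int)).getD []) = (es1_l[iw], es2_l[jw]) := by
    intro j hj
    subst hj
    simp [PySem.List.pyGet?_natCast, List.getElem?_eq_getElem hiw, List.getElem?_eq_getElem hjw]
  by_cases hp1 : s2[jw]? = some (v - (dm : Int))
  · have h1 : ∃ k : Nat, s2[k]? = some (v - (dm : Int)) := ⟨jw, hp1⟩
    have hk1jw : Nat.find h1 = jw :=
      le_antisymm (Nat.find_min' h1 hp1) (hF _ (Or.inl (Nat.find_spec h1)))
    have hget1 : (pvFirst2 s2).get? (v - (dm : Int)) = some ((Nat.find h1 : Nat) : Int) :=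
      pv_first2_some s2 _ (Nat.find h1) (Nat.find_spec h1) (fun k hk => Nat.find_min' h1 hk)
    by_cases h2 : ∃ k : Nat, s2[k]? = some (v + (dm : Int))
    · have hget2 : (pvFirst2 s2).get? (v + (dm : Int)) = some ((Nat.find h2 : Nat) : Int) :=
        pv_first2_some s2 _ (Nat.find h2) (Nat.find_spec h2) (fun k hk => Nat.find_min' h2 hk)
      have hjwk2 : jw ≤ Nat.find h2 := hF _ (Or.inr (Nat.find_spec h2))
      simp only [pvScan, hget1, hget2]
      rw [if_pos (by exact_mod_cast (by omega : Nat.find h1 ≤ Nat.find h2))]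
      exact hret _ hk1jw
    · have hget2 : (pvFirst2 s2).get? (v + (dm : Int)) = none := by
        apply pv_first2_none
        intro k hk
        exact h2 ⟨k, hk⟩
      simp only [pvScan, hget1, hget2]
      exact hret _ hk1jw
  · have hp2 : s2[jw]? = some (v + (dm : Int)) := by tauto
    have h2 : ∃ k : Nat, s2[k]? = some (v + (dm : Int)) := ⟨jw, hp2⟩
    have hk2jw : Nat.find h2 = jw :=
      le_antisymm (Nat.find_min' h2 hp2) (hF _ (Or.inr (Nat.find_spec h2)))
    have hget2 : (pvFirst2 s2).get? (v + (dm : Int)) = some ((Nat.find h2 : Nat) : Int) :=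
      pv_first2_some s2 _ (Nat.find h2) (Nat.find_spec h2) (fun k hk => Nat.find_min' h2 hk)
    by_cases h1 : ∃ k : Nat, s2[k]? = some (v - (dm : Int))
    · have hget1 : (pvFirst2 s2).get? (v - (dm : Int)) = some ((Nat.find h1 : Nat) : Int) :=
        pv_first2_some s2 _ (Nat.find h1) (Nat.find_spec h1) (fun k hk => Nat.find_min' h1 hk)
      have hjwk1 : jw ≤ Nat.find h1 := hF _ (Or.inl (Nat.find_spec h1))
      simp only [pvScan, hget1, hget2]
      by_cases hle : Nat.find h1 ≤ Nat.find h2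
      · rw [if_pos (by exact_mod_cast hle)]
        exact hret _ (by omega)
      · rw [if_neg (by exact_mod_cast hle)]
        exact hret _ hk2jw
    · have hget1 : (pvFirst2 s2).get? (v - (dm : Int)) = none := by
        apply pv_first2_none
        intro k hk
        exact h1 ⟨k, hk⟩
      simp only [pvScan, hget1, hget2]
      exact hret _ hk2jw

theorem pv_scan_drop (es1_l es2_l : List (List Int)) (iw jw : Nat)
    (hiw : iw < es1_l.length) (hjw : jw < es2_l.length)
    (hmin : ∀ i' < es1_l.length, ∀ j' < es2_l.length,
      pvDist es1_l es2_l iw jw ≤ pvDist es1_l es2_l i' j' ∧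
      (pvDist es1_l es2_l i' j' = pvDist es1_l es2_l iw jw → (iw < i' ∨ (iw = i' ∧ jw ≤ j')))) :
    ∀ (m s : Nat), s ≤ iw → iw - s ≤ m →
    pvScan es1_l es2_l (pvFirst2 (es2_l.map List.sum)) ((pvDist es1_l es2_l iw jw : Int))
      (PySem.List.enumerate ((es1_l.map List.sum).drop s) ((s : Nat) : Int)) = (es1_l[iw], es2_l[jw]) := by
  intro m
  induction m with
  | zero =>
    intro s hs hms
    have hseq : s = iw := by omega
    subst hseq
    rw [List.drop_eq_getElem_cons (by simpa using hiw), PySem.List.enumerate_cons,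
      List.getElem_map]
    exact pv_scan_head es1_l es2_l s jw hiw hjw hmin _
  | succ m ih =>
    intro s hs hms
    by_cases hseq : s = iw
    · subst hseq
      rw [List.drop_eq_getElem_cons (by simpa using hiw), PySem.List.enumerate_cons,
        List.getElem_map]
      exact pv_scan_head es1_l es2_l s jw hiw hjw hmin _
    · have hslt : s < iw := lt_of_le_of_ne hs hseq
      have hslen : s < es1_l.length := lt_trans hslt hiw
      have hnok : ∀ k : Nat, ((es2_l.map List.sum)[k]? = some (es1_l[s].sum - (pvDist es1_l es2_l iw jw : Int)) ∨
            (es2_l.map List.sum)[k]? = some (es1_l[s].sum + (pvDist es1_l es2_l iw jw : Int))) → False := by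
        intro k hk
        have hklen : k < es2_l.length := by
          rcases hk with hk | hk
          · exact pv_some_lt _ _ _ hk
          · exact pv_some_lt _ _ _ hk
        have hdk : pvDist es1_l es2_l s k = pvDist es1_l es2_l iw jw :=
          (pv_key_iff es1_l es2_l s k hslen hklen _).1 hk
        have := (hmin s hslen k hklen).2 hdk
        omega
      have hget1 : (pvFirst2 (es2_l.map List.sum)).get?
          (es1_l[s].sum - (pvDist es1_l es2_l iw jw : Int)) = none := by
        apply pv_first2_none
        intro k hk
        exact hnok k (Or.inl hk)
      have hget2 : (pvFirst2 (es2_l.map List.sum)).get?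
          (es1_l[s].sum + (pvDist es1_l es2_l iw jw : Int)) = none := by
        apply pv_first2_none
        intro k hk
        exact hnok k (Or.inr hk)
      rw [List.drop_eq_getElem_cons (by simpa using hslen), PySem.List.enumerate_cons,
        List.getElem_map]
      simp only [pvScan, hget1, hget2]
      have hcast : ((s : Nat) : Int) + 1 = (((s + 1 : Nat) : Nat) : Int) := by push_cast; ring
      rw [hcast]
      exact ih (s + 1) (by omega) (by omega)

theorem pv_alt_unfold (es1_l es2_l : List (List Int)) (x y : Int) (as bs : List Int)
    (hA : PySem.List.sorted (es1_l.map List.sum) (fun x => x) false = x :: as)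
    (hB : PySem.List.sorted (es2_l.map List.sum) (fun x => x) false = y :: bs) :
    nearest_entity_alt es1_l es2_l =
      pvScan es1_l es2_l (pvFirst2 (es2_l.map List.sum))
        (pvTP (x :: as) (y :: bs) (((x - y).natAbs : Int)))
        (PySem.List.enumerate (es1_l.map List.sum) 0) := by
  simp only [nearest_entity_alt]
  rw [hA, hB]

theorem pv_B_eq (es1_l es2_l : List (List Int)) (iw jw : Nat)
    (hiw : iw < es1_l.length) (hjw : jw < es2_l.length)
    (hmin0 : ∀ i' ∈ List.range es1_l.length, ∀ j' ∈ List.range es2_l.length,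
      pvDist es1_l es2_l iw jw ≤ pvDist es1_l es2_l i' j' ∧
      (pvDist es1_l es2_l i' j' = pvDist es1_l es2_l iw jw → (iw < i' ∨ (iw = i' ∧ jw ≤ j')))) :
    nearest_entity_alt es1_l es2_l = (es1_l[iw], es2_l[jw]) := by
  have hmin : ∀ i' < es1_l.length, ∀ j' < es2_l.length,
      pvDist es1_l es2_l iw jw ≤ pvDist es1_l es2_l i' j' ∧
      (pvDist es1_l es2_l i' j' = pvDist es1_l es2_l iw jw → (iw < i' ∨ (iw = i' ∧ jw ≤ j'))) :=
    fun i' hi' j' hj' => hmin0 i' (List.mem_range.2 hi') j' (List.mem_range.2 hj')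
  rcases hA : PySem.List.sorted (es1_l.map List.sum) (fun x => x) false with _ | ⟨x, as⟩
  · rw [PySem.List.sorted_eq_nil_iff, List.map_eq_nil_iff] at hA
    rw [hA] at hiw
    simp at hiw
  rcases hB : PySem.List.sorted (es2_l.map List.sum) (fun x => x) false with _ | ⟨y, bs⟩
  · rw [PySem.List.sorted_eq_nil_iff, List.map_eq_nil_iff] at hB
    rw [hB] at hjw
    simp at hjw
  rw [pv_alt_unfold es1_l es2_l x y as bs hA hB]
  -- the two-pointer result is the minimal pair distance, i.e. pvDist iw jw
  have hsort1 : (x :: as).Pairwise (· ≤ ·) := by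
    have := PySem.List.sorted_pairwise (es1_l.map List.sum) (fun x : Int => x)
    rw [hA] at this
    exact this
  have hsort2 : (y :: bs).Pairwise (· ≤ ·) := by
    have := PySem.List.sorted_pairwise (es2_l.map List.sum) (fun x : Int => x)
    rw [hB] at this
    exact this
  obtain ⟨htpd, htple, htpmem⟩ := pv_tp_spec ((x :: as).length + (y :: bs).length)
    (x :: as) (y :: bs) le_rfl hsort1 hsort2 (((x - y).natAbs : Int))
  set dmin := pvTP (x :: as) (y :: bs) (((x - y).natAbs : Int)) with hdmin
  have hmemA : ∀ u : Int, u ∈ x :: as ↔ u ∈ es1_l.map List.sum := by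
    intro u
    rw [← hA]
    exact PySem.List.mem_sorted _ _ _ _
  have hmemB : ∀ u : Int, u ∈ y :: bs ↔ u ∈ es2_l.map List.sum := by
    intro u
    rw [← hB]
    exact PySem.List.mem_sorted _ _ _ _
  have hlow : ∀ i, (hi : i < es1_l.length) → ∀ k, (hk : k < es2_l.length) →
      dmin ≤ ((pvDist es1_l es2_l i k : Nat) : Int) := by
    intro i hi k hk
    have hu : es1_l[i].sum ∈ x :: as := (hmemA _).2 (by
      exact List.mem_map_of_mem (List.getElem_mem hi))
    have hw : es2_l[k].sum ∈ y :: bs := (hmemB _).2 (by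
      exact List.mem_map_of_mem (List.getElem_mem hk))
    have := htple _ hu _ hw
    rw [pvDist, List.getD_eq_getElem _ _ hi, List.getD_eq_getElem _ _ hk]
    exact this
  have hex : ∃ i, i < es1_l.length ∧ ∃ k, k < es2_l.length ∧
      dmin = ((pvDist es1_l es2_l i k : Nat) : Int) := by
    have hpair : ∃ u ∈ x :: as, ∃ w ∈ y :: bs, dmin = ((u - w).natAbs : Int) := by
      rcases htpmem with h | h
      · exact ⟨x, List.mem_cons_self, y, List.mem_cons_self, h⟩
      · exact h
    obtain ⟨u, hu, w, hw, hd⟩ := hpair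
    obtain ⟨e1, he1, rfl⟩ := List.mem_map.1 ((hmemA u).1 hu)
    obtain ⟨e2, he2, rfl⟩ := List.mem_map.1 ((hmemB w).1 hw)
    obtain ⟨i, hi, rfl⟩ := List.getElem_of_mem he1
    obtain ⟨k, hk, rfl⟩ := List.getElem_of_mem he2
    refine ⟨i, hi, k, hk, ?_⟩
    rw [hd, pvDist, List.getD_eq_getElem _ _ hi, List.getD_eq_getElem _ _ hk]
  have hdmeq : dmin = ((pvDist es1_l es2_l iw jw : Nat) : Int) := by
    obtain ⟨i, hi, k, hk, hd⟩ := hex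
    have h1 := hlow iw hiw jw hjw
    have h2 := (hmin i hi k hk).1
    omega
  rw [hdmeq]
  have := pv_scan_drop es1_l es2_l iw jw hiw hjw hmin iw 0 (by omega) (by omega)
  simpa using this

-- ===== VERDICT (by name: the statement is the Claim_ definition above) =====
theorem nearest_entity_spec : Claim_equal_nearest_entity := by
  intro es1_l es2_l _ hpre
  unfold Spec_nearest_entity
  obtain ⟨iw, hiw, jw, hjw, hdw, hne1, hne2, hmin⟩ := hpre
  rw [List.mem_range] at hiw hjw
  rw [pv_A_eq es1_l es2_l iw jw hiw hjw hne1 hne2 hdw hmin,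
      pv_B_eq es1_l es2_l iw jw hiw hjw hmin]
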